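-- pv_equiv track=rewrite | github.com/dkgusdkfk/Algorithm | 프로그래머스/파괴되지않은건물.py | solution
-- ===== SOURCE A (Python) =====
-- def solution(board, skill):
--     answer = 0
--
--     m = len(board)
--     n = len(board[0])
--
--     array = [[0 for _ in range(n+1)] for _ in range(m+1)]
--
--     for type, r1, c1, r2, c2, degree in skill:
--         array[r1][c1] += degree if type == 2 else -degree
--         array[r1][c2 + 1] += -degree if type == 2 else degree
--         array[r2 + 1][c1] += -degree if type == 2 else degree
--         array[r2 + 1][c2 + 1] += degree if type == 2 else -degree
--
--     for i in range(m):
--         for j in range(n):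
--             array[i][j+1] += array[i][j]
--
--     for j in range(n):
--         for i in range(m):
--             array[i+1][j] += array[i][j]
--
--     for i in range(m):
--         for j in range(n):
--             board[i][j] += array[i][j]
--             if board[i][j] > 0:
--                 answer += 1
--
--     return answer
-- ===== SOURCE B (Python) =====
-- def solution(board, skill):
--     m = len(board)
--     n = len(board[0])
--     for type, r1, c1, r2, c2, degree in skill:
--         delta = degree if type == 2 else -degree
--         for i in range(r1, r2 + 1):
--             for j in range(c1, c2 + 1):
--                 board[i][j] += delta
--     return sum(1 for i in range(m) for j in range(n) if board[i][j] > 0)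
-- ===== Notes on version B (the rewrite author's own statement) =====
-- stated objective: simpler
-- what changed: Replaces the (m+1)x(n+1) difference array and the two prefix-sum passes with a direct loop that adds each skill's delta to every cell of its rectangle, then counts positive cells.
-- outside the precondition, e.g. on solution([[1]], [[1, -1, 0, -1, 0, 1]]): A returns 1, B returns 0; on solution([[0], [0], [0]], [[1, 2, 0, 0, 0, 1]]): A returns 1, B returns 0
import Mathlib
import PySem

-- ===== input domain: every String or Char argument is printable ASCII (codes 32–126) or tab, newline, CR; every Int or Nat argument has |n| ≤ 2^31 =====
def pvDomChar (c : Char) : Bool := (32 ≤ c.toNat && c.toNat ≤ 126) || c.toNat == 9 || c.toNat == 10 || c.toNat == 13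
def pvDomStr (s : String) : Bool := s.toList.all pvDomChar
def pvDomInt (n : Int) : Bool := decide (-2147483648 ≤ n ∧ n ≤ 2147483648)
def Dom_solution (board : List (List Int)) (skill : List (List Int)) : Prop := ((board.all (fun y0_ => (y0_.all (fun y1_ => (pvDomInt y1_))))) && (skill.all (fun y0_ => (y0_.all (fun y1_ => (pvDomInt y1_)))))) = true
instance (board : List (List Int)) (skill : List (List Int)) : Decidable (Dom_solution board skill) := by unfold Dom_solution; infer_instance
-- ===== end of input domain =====

-- B replaces A's difference array + two prefix-sum passes by adding each skill's delta directly
-- to its rectangle (simpler, not faster). Both Pythons mutate `board` in place the same way;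
-- the equivalence proved here is about the RETURN value.

-- ===== PORT A =====
-- g[i][j] read with Nat indices known non-negative in the Python (loop counters); default never hit inside Pre_
def gget (g : List (List Int)) (i j : Nat) : Int := (g.getD i []).getD j 0
-- g[i][j] += d with Nat indices (Python loop counters, always in range inside Pre_)
def gmod (g : List (List Int)) (i j : Nat) (d : Int) : List (List Int) :=
  g.modify i (fun row => row.modify j (fun v => v + d))
-- g[i][j] += d with Python int indices: exact negative-index normalisation via PySem.List.pyIdx?;
-- `none` is where Python raises IndexError (excluded by Pre_), the port leaves g unchanged there
def gmodI (g : List (List Int)) (i j : Int) (d : Int) : List (List Int) :=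
  match PySem.List.pyIdx? g.length i with
  | none => g
  | some ii =>
      g.modify ii (fun row =>
        match PySem.List.pyIdx? row.length j with
        | none => row
        | some jj => row.modify jj (fun v => v + d))

-- body of A's `for type, r1, c1, r2, c2, degree in skill:` loop (non-6-tuples raise, excluded by Pre_)
def stepA (arr : List (List Int)) (s : List Int) : List (List Int) :=
  match s with
  | [t, r1, c1, r2, c2, d] =>
      let arr := gmodI arr r1 c1 (if t == 2 then d else -d)
      let arr := gmodI arr r1 (c2 + 1) (if t == 2 then -d else d)
      let arr := gmodI arr (r2 + 1) c1 (if t == 2 then -d else d)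
      gmodI arr (r2 + 1) (c2 + 1) (if t == 2 then d else -d)
  | _ => arr

-- A's row prefix-sum pass, one row i:  for j in range(n): array[i][j+1] += array[i][j]
def rowPassRow (n : Nat) (arr : List (List Int)) (i : Nat) : List (List Int) :=
  (List.range n).foldl (fun a j => gmod a i (j + 1) (gget a i j)) arr

-- A's column prefix-sum pass, one column j:  for i in range(m): array[i+1][j] += array[i][j]
def colPassCol (m : Nat) (arr : List (List Int)) (j : Nat) : List (List Int) :=
  (List.range m).foldl (fun a i => gmod a (i + 1) j (gget a i j)) arr

-- A's final loop, one row i: board[i][j] += array[i][j]; if board[i][j] > 0: answer += 1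
def countRowA (arr3 : List (List Int)) (n : Nat) (st : List (List Int) × Int) (i : Nat) :
    List (List Int) × Int :=
  (List.range n).foldl (fun st j =>
    let bd := gmod st.1 i j (gget arr3 i j)
    (bd, st.2 + (if 0 < gget bd i j then (1 : Int) else 0))) st

def solution (board : List (List Int)) (skill : List (List Int)) : Int :=
  let m := board.length
  let n := (board.headD []).length
  let arr1 := skill.foldl stepA (List.replicate (m + 1) (List.replicate (n + 1) (0 : Int)))
  let arr2 := (List.range m).foldl (rowPassRow n) arr1
  let arr3 := (List.range n).foldl (colPassCol m) arr2
  ((List.range m).foldl (countRowA arr3 n) (board, (0 : Int))).2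

-- ===== PORT B =====
-- B's rectangle update:  for i in range(r1, r2+1): for j in range(c1, c2+1): board[i][j] += delta
def rectAdd (bd : List (List Int)) (r1 c1 r2 c2 delta : Int) : List (List Int) :=
  (PySem.List.pyRange r1 (r2 + 1) 1).foldl (fun bd i =>
    (PySem.List.pyRange c1 (c2 + 1) 1).foldl (fun bd j => gmodI bd i j delta) bd) bd

def stepB (bd : List (List Int)) (s : List Int) : List (List Int) :=
  match s with
  | [t, r1, c1, r2, c2, d] => rectAdd bd r1 c1 r2 c2 (if t == 2 then d else -d)
  | _ => bd

def solution_alt (board : List (List Int)) (skill : List (List Int)) : Int :=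
  let m := board.length
  let n := (board.headD []).length
  let bd := skill.foldl stepB board
  (List.range m).foldl (fun acc i =>
    (List.range n).foldl (fun acc j => acc + (if 0 < gget bd i j then (1 : Int) else 0)) acc) 0

-- ===== PRECONDITION & SPEC =====
-- one skill entry is a 6-list [t,r1,c1,r2,c2,d] with 0 ≤ r1 ≤ r2 < m and 0 ≤ c1 ≤ c2 < n
def okSkill (m n : Nat) (s : List Int) : Prop :=
  s.length = 6 ∧
  0 ≤ s.getD 1 0 ∧ s.getD 1 0 ≤ s.getD 3 0 ∧ s.getD 3 0 < (m : Int) ∧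
  0 ≤ s.getD 2 0 ∧ s.getD 2 0 ≤ s.getD 4 0 ∧ s.getD 4 0 < (n : Int)

-- Pre_ excludes inputs on which A raises (empty board, rows shorter than row 0, skill rows that are
-- not 6-lists, corner indices outside the difference array), and skill rows with negative or
-- inverted (r1 > r2 / c1 > c2) coordinates: there A still returns, but its value comes from
-- accidental negative-index wraparound / leftover difference-array corners, while B's empty or
-- wrapped Python ranges are an equally accidental value — an unspecified corner for both.
def Pre_solution (board : List (List Int)) (skill : List (List Int)) : Prop :=
  board ≠ [] ∧
  (∀ row ∈ board, (board.headD []).length ≤ row.length) ∧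
  (∀ s ∈ skill, okSkill board.length (board.headD []).length s)

instance (board : List (List Int)) (skill : List (List Int)) : Decidable (Pre_solution board skill) := by
  unfold Pre_solution okSkill; infer_instance

def pvWitness_solution : List (List Int) × List (List Int) :=
  ([[1, -1], [0, 2]], [[1, 0, 0, 1, 1, 1], [2, 0, 1, 0, 1, 3]])

def Spec_solution (board : List (List Int)) (skill : List (List Int)) (out : Int) : Prop := out = solution_alt board skill
instance (board : List (List Int)) (skill : List (List Int)) (out : Int) : Decidable (Spec_solution board skill out) := by unfold Spec_solution; infer_instance

-- ===== CLAIM (what is proved, stated in full; the proofs are below) =====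
def Claim_equal_solution : Prop := ∀ (board : List (List Int)) (skill : List (List Int)), Dom_solution board skill → Pre_solution board skill → Spec_solution board skill (solution board skill)

-- ===== LEMMAS AND PROOFS =====

-- exact shape: m rows, each of length exactly n (the difference array)
def dims (g : List (List Int)) (m n : Nat) : Prop :=
  g.length = m ∧ ∀ k, k < m → (g.getD k []).length = n

-- m rows of length ≥ n (the board: rows may be longer than row 0)
def dimsGe (g : List (List Int)) (m n : Nat) : Prop :=
  g.length = m ∧ ∀ k, k < m → n ≤ (g.getD k []).length

-- the four difference-array corner contributions of one skill entry at cell (i,j)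
def diffC (s : List Int) (i j : Nat) : Int :=
  match s with
  | [t, r1, c1, r2, c2, d] =>
      (if (i : Int) = r1 ∧ (j : Int) = c1 then (if t == 2 then d else -d) else 0) +
      (if (i : Int) = r1 ∧ (j : Int) = c2 + 1 then (if t == 2 then -d else d) else 0) +
      (if (i : Int) = r2 + 1 ∧ (j : Int) = c1 then (if t == 2 then -d else d) else 0) +
      (if (i : Int) = r2 + 1 ∧ (j : Int) = c2 + 1 then (if t == 2 then d else -d) else 0)
  | _ => 0

-- the delta one skill entry adds at cell (i,j)
def cover (s : List Int) (i j : Nat) : Int :=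
  match s with
  | [t, r1, c1, r2, c2, d] =>
      if r1 ≤ (i : Int) ∧ (i : Int) ≤ r2 ∧ c1 ≤ (j : Int) ∧ (j : Int) ≤ c2 then (if t == 2 then d else -d) else 0
  | _ => 0

def dsum (skill : List (List Int)) (i j : Nat) : Int := (skill.map (fun s => diffC s i j)).sum
def tot (skill : List (List Int)) (i j : Nat) : Int := (skill.map (fun s => cover s i j)).sum

lemma getD_modify {α : Type} (l : List α) (i : Nat) (f : α → α) (k : Nat) (d : α) :
    (l.modify i f).getD k d = if i = k ∧ k < l.length then f (l.getD k d) else l.getD k d := by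
  by_cases hk : k < l.length
  · have hsome : l[k]? = some l[k] := List.getElem?_eq_getElem hk
    by_cases hik : i = k
    · simp [List.getD_eq_getElem?_getD, List.getElem?_modify, hsome, hik, hk]
    · simp [List.getD_eq_getElem?_getD, List.getElem?_modify, hsome, hik, hk]
  · have hnone : l[k]? = none := List.getElem?_eq_none (by omega)
    simp [List.getD_eq_getElem?_getD, List.getElem?_modify, hnone, hk]

lemma gget_gmod (g : List (List Int)) (i j : Nat) (d : Int) (i' j' : Nat) :
    gget (gmod g i j d) i' j' =
      if i = i' ∧ j = j' ∧ i' < g.length ∧ j' < (g.getD i' []).length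
      then gget g i' j' + d else gget g i' j' := by
  simp only [gget, gmod]
  rw [getD_modify]
  by_cases h1 : i = i' ∧ i' < g.length
  · rw [if_pos h1, getD_modify]
    by_cases h2 : j = j' ∧ j' < (g.getD i' []).length
    · rw [if_pos h2, if_pos ⟨h1.1, h2.1, h1.2, h2.2⟩]
    · rw [if_neg h2, if_neg (by tauto)]
  · rw [if_neg h1, if_neg (by tauto)]

lemma length_gmod (g : List (List Int)) (i j : Nat) (d : Int) : (gmod g i j d).length = g.length := by
  simp [gmod]

lemma rowlen_gmod (g : List (List Int)) (i j : Nat) (d : Int) (k : Nat) :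
    ((gmod g i j d).getD k []).length = (g.getD k []).length := by
  simp only [gmod]
  rw [getD_modify]
  split_ifs with h
  · simp
  · rfl

lemma gmodI_eq_gmod (g : List (List Int)) (i j d : Int) (hi : 0 ≤ i) (hj : 0 ≤ j) :
    gmodI g i j d = gmod g i.toNat j.toNat d := by
  simp only [gmodI, PySem.List.pyIdx?, if_pos hi, if_pos hj]
  by_cases h1 : i < (g.length : Int)
  · rw [if_pos h1]
    simp only [gmod]
    congr 1
    funext row
    by_cases h2 : j < (row.length : Int)
    · rw [if_pos h2]
    · rw [if_neg h2]
      exact (List.modify_eq_self (l := row) (i := j.toNat) (by omega)).symm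
  · rw [if_neg h1]
    exact (List.modify_eq_self (l := g) (i := i.toNat) (by omega)).symm

lemma dims_gmod {g : List (List Int)} {m n : Nat} (h : dims g m n) (i j : Nat) (d : Int) :
    dims (gmod g i j d) m n := by
  obtain ⟨h1, h2⟩ := h
  exact ⟨by rw [length_gmod, h1], fun k hk => by rw [rowlen_gmod]; exact h2 k hk⟩

lemma dimsGe_gmod {g : List (List Int)} {m n : Nat} (h : dimsGe g m n) (i j : Nat) (d : Int) :
    dimsGe (gmod g i j d) m n := by
  obtain ⟨h1, h2⟩ := h
  exact ⟨by rw [length_gmod, h1], fun k hk => by rw [rowlen_gmod]; exact h2 k hk⟩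

-- ---- A, stage 1: the skill loop fills the difference array ----

lemma six_shape {s : List Int} (h : s.length = 6) :
    ∃ a b c d e f, s = [a, b, c, d, e, f] := by
  rcases s with _ | ⟨a, _ | ⟨b, _ | ⟨c, _ | ⟨d, _ | ⟨e, _ | ⟨f, _ | ⟨g, s⟩⟩⟩⟩⟩⟩⟩ <;>
    first
      | exact ⟨a, b, c, d, e, f, rfl⟩
      | simp at h

lemma gget_gmod_dims {g : List (List Int)} {m n : Nat} (hg : dims g (m + 1) (n + 1))
    (p q d : Int) (hp : 0 ≤ p) (hq : 0 ≤ q) (hpm : p ≤ (m : Int)) (hqn : q ≤ (n : Int))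
    (i j : Nat) (hi : i ≤ m) (hj : j ≤ n) :
    gget (gmod g p.toNat q.toNat d) i j =
      if (i : Int) = p ∧ (j : Int) = q then gget g i j + d else gget g i j := by
  obtain ⟨hg1, hg2⟩ := hg
  rw [gget_gmod]
  by_cases hc : (i : Int) = p ∧ (j : Int) = q
  · rw [if_pos hc, if_pos ⟨by omega, by omega, by omega, by rw [hg2 i (by omega)]; omega⟩]
  · rw [if_neg hc, if_neg (fun h => hc ⟨by omega, by omega⟩)]

lemma stepA_char {m n : Nat} {s : List Int} (hs : okSkill m n s)
    {arr : List (List Int)} (hd : dims arr (m + 1) (n + 1)) :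
    dims (stepA arr s) (m + 1) (n + 1) ∧
    ∀ i j : Nat, i ≤ m → j ≤ n → gget (stepA arr s) i j = gget arr i j + diffC s i j := by
  obtain ⟨hlen, hr10, hr12, hr2m, hc10, hc12, hc2n⟩ := hs
  obtain ⟨t, r1, c1, r2, c2, d, rfl⟩ := six_shape hlen
  simp only [List.getD_cons_succ, List.getD_cons_zero] at hr10 hr12 hr2m hc10 hc12 hc2n
  have e1 : stepA arr [t, r1, c1, r2, c2, d] =
      gmod (gmod (gmod (gmod arr r1.toNat c1.toNat (if t == 2 then d else -d))
            r1.toNat (c2 + 1).toNat (if t == 2 then -d else d))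
          (r2 + 1).toNat c1.toNat (if t == 2 then -d else d))
        (r2 + 1).toNat (c2 + 1).toNat (if t == 2 then d else -d) := by
    simp only [stepA]
    rw [gmodI_eq_gmod _ _ _ _ hr10 hc10, gmodI_eq_gmod _ _ _ _ hr10 (by omega),
      gmodI_eq_gmod _ _ _ _ (by omega) hc10, gmodI_eq_gmod _ _ _ _ (by omega) (by omega)]
  have d1 := dims_gmod hd r1.toNat c1.toNat (if t == 2 then d else -d)
  have d2 := dims_gmod d1 r1.toNat (c2 + 1).toNat (if t == 2 then -d else d)
  have d3 := dims_gmod d2 (r2 + 1).toNat c1.toNat (if t == 2 then -d else d)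
  have d4 := dims_gmod d3 (r2 + 1).toNat (c2 + 1).toNat (if t == 2 then d else -d)
  refine ⟨by rw [e1]; exact d4, fun i j hi hj => ?_⟩
  rw [e1,
    gget_gmod_dims d3 (r2 + 1) (c2 + 1) _ (by omega) (by omega) (by omega) (by omega) i j hi hj,
    gget_gmod_dims d2 (r2 + 1) c1 _ (by omega) hc10 (by omega) (by omega) i j hi hj,
    gget_gmod_dims d1 r1 (c2 + 1) _ hr10 (by omega) (by omega) (by omega) i j hi hj,
    gget_gmod_dims hd r1 c1 _ hr10 hc10 (by omega) (by omega) i j hi hj]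
  simp only [diffC]
  split_ifs <;> ring

lemma foldA1 {m n : Nat} (skill : List (List Int)) (hs : ∀ s ∈ skill, okSkill m n s)
    (arr : List (List Int)) (hd : dims arr (m + 1) (n + 1)) :
    dims (skill.foldl stepA arr) (m + 1) (n + 1) ∧
    ∀ i j : Nat, i ≤ m → j ≤ n →
      gget (skill.foldl stepA arr) i j = gget arr i j + dsum skill i j := by
  induction skill generalizing arr with
  | nil => exact ⟨hd, fun i j _ _ => by simp [dsum]⟩
  | cons s rest ih =>
    have hc := stepA_char (hs s (by simp)) hd
    obtain ⟨ihd, ihg⟩ := ih (fun x hx => hs x (by simp [hx])) (stepA arr s) hc.1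
    refine ⟨ihd, fun i j hi hj => ?_⟩
    rw [List.foldl_cons, ihg i j hi hj, hc.2 i j hi hj]
    simp only [dsum, List.map_cons, List.sum_cons]
    ring

lemma gget_replicate (m n i j : Nat) :
    gget (List.replicate m (List.replicate n (0 : Int))) i j = 0 := by
  simp only [gget, List.getD_eq_getElem?_getD, List.getElem?_replicate]
  split_ifs <;> simp

lemma dims_replicate (m n : Nat) : dims (List.replicate m (List.replicate n (0 : Int))) m n := by
  refine ⟨by simp, fun k hk => ?_⟩
  simp [List.getD_eq_getElem?_getD, List.getElem?_replicate, hk]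

-- ---- A, stage 2: row prefix pass ----

lemma rowInner {m n : Nat} (i : Nat) (him : i < m) :
    ∀ (k : Nat), k ≤ n → ∀ (arr : List (List Int)), dims arr (m + 1) (n + 1) →
      dims ((List.range k).foldl (fun a j => gmod a i (j + 1) (gget a i j)) arr) (m + 1) (n + 1) ∧
      ∀ i' j' : Nat,
        gget ((List.range k).foldl (fun a j => gmod a i (j + 1) (gget a i j)) arr) i' j' =
          if i' = i ∧ j' ≤ k then ∑ t ∈ Finset.range (j' + 1), gget arr i t else gget arr i' j' := by
  intro k
  induction k with
  | zero =>
    intro _ arr hd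
    refine ⟨by simpa using hd, fun i' j' => ?_⟩
    simp only [List.range_zero, List.foldl_nil]
    by_cases hc : i' = i ∧ j' ≤ 0
    · obtain ⟨rfl, hj0⟩ := hc
      have hj0' : j' = 0 := by omega
      subst hj0'
      rw [if_pos ⟨rfl, le_refl 0⟩, Finset.sum_range_one]
    · rw [if_neg hc]
  | succ k ihk =>
    intro hk arr hd
    obtain ⟨Rd, Rg⟩ := ihk (by omega) arr hd
    rw [List.range_succ, List.foldl_append, List.foldl_cons, List.foldl_nil]
    set R := (List.range k).foldl (fun a j => gmod a i (j + 1) (gget a i j)) arr with hR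
    have hRik : gget R i k = ∑ t ∈ Finset.range (k + 1), gget arr i t := by
      rw [Rg i k, if_pos ⟨rfl, le_refl k⟩]
    refine ⟨dims_gmod Rd _ _ _, fun i' j' => ?_⟩
    rw [gget_gmod]
    by_cases hii : i' = i
    · subst hii
      by_cases hjj : j' = k + 1
      · subst hjj
        rw [if_pos ⟨rfl, rfl, by rw [Rd.1]; omega, by rw [Rd.2 i' (by omega)]; omega⟩]
        rw [hRik, Rg i' (k + 1), if_neg (fun h => by omega), if_pos ⟨rfl, by omega⟩,
          Finset.sum_range_succ (fun t => gget arr i' t) (k + 1)]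
        ring
      · rw [if_neg (fun h => hjj h.2.1.symm), Rg i' j']
        by_cases hjk : j' ≤ k
        · rw [if_pos ⟨rfl, hjk⟩, if_pos ⟨rfl, by omega⟩]
        · rw [if_neg (fun h => hjk h.2), if_neg (fun h => absurd h.2 (by omega))]
    · rw [if_neg (fun h => hii h.1.symm), Rg i' j', if_neg (fun h => hii h.1),
        if_neg (fun h => hii h.1)]

lemma rowOuter {m n : Nat} :
    ∀ (k : Nat), k ≤ m → ∀ (arr : List (List Int)), dims arr (m + 1) (n + 1) →
      dims ((List.range k).foldl (rowPassRow n) arr) (m + 1) (n + 1) ∧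
      ∀ i' j' : Nat,
        gget ((List.range k).foldl (rowPassRow n) arr) i' j' =
          if i' < k ∧ j' ≤ n then ∑ t ∈ Finset.range (j' + 1), gget arr i' t else gget arr i' j' := by
  intro k
  induction k with
  | zero =>
    intro _ arr hd
    refine ⟨by simpa using hd, fun i' j' => ?_⟩
    simp only [List.range_zero, List.foldl_nil]
    rw [if_neg (fun h => Nat.not_lt_zero i' h.1)]
  | succ k ihk =>
    intro hk arr hd
    obtain ⟨Rd, Rg⟩ := ihk (by omega) arr hd
    rw [List.range_succ, List.foldl_append, List.foldl_cons, List.foldl_nil]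
    set R := (List.range k).foldl (rowPassRow n) arr with hR
    obtain ⟨Id, Ig⟩ := rowInner (m := m) (n := n) k (by omega) n (le_refl n) R Rd
    rw [show rowPassRow n R k =
        (List.range n).foldl (fun a j => gmod a k (j + 1) (gget a k j)) R from rfl]
    refine ⟨Id, fun i' j' => ?_⟩
    rw [Ig i' j']
    by_cases hii : i' = k
    · subst hii
      have harr : ∀ t : Nat, gget R i' t = gget arr i' t := fun t => by
        rw [Rg i' t, if_neg (fun h => by omega)]
      by_cases hjn : j' ≤ n
      · rw [if_pos ⟨rfl, hjn⟩, if_pos ⟨by omega, hjn⟩,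
          Finset.sum_congr rfl (fun t _ => harr t)]
      · rw [if_neg (fun h => hjn h.2), if_neg (fun h => hjn h.2), harr j']
    · rw [if_neg (fun h => hii h.1), Rg i' j']
      by_cases hik : i' < k
      · by_cases hjn : j' ≤ n
        · rw [if_pos ⟨hik, hjn⟩, if_pos ⟨by omega, hjn⟩]
        · rw [if_neg (fun h => hjn h.2), if_neg (fun h => hjn h.2)]
      · rw [if_neg (fun h => hik h.1), if_neg (fun h => absurd h.1 (by omega))]

-- ---- A, stage 3: column prefix pass ----

lemma colInner {m n : Nat} (j : Nat) (hjn : j ≤ n) :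
    ∀ (k : Nat), k ≤ m → ∀ (arr : List (List Int)), dims arr (m + 1) (n + 1) →
      dims ((List.range k).foldl (fun a i => gmod a (i + 1) j (gget a i j)) arr) (m + 1) (n + 1) ∧
      ∀ i' j' : Nat,
        gget ((List.range k).foldl (fun a i => gmod a (i + 1) j (gget a i j)) arr) i' j' =
          if j' = j ∧ i' ≤ k then ∑ t ∈ Finset.range (i' + 1), gget arr t j else gget arr i' j' := by
  intro k
  induction k with
  | zero =>
    intro _ arr hd
    refine ⟨by simpa using hd, fun a b => ?_⟩
    simp only [List.range_zero, List.foldl_nil]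
    by_cases hc : b = j ∧ a ≤ 0
    · obtain ⟨rfl, ha0⟩ := hc
      have ha0' : a = 0 := by omega
      subst ha0'
      rw [if_pos ⟨rfl, le_refl 0⟩, Finset.sum_range_one]
    · rw [if_neg hc]
  | succ k ihk =>
    intro hk arr hd
    obtain ⟨Rd, Rg⟩ := ihk (by omega) arr hd
    rw [List.range_succ, List.foldl_append, List.foldl_cons, List.foldl_nil]
    set R := (List.range k).foldl (fun a i => gmod a (i + 1) j (gget a i j)) arr with hR
    have hRkj : gget R k j = ∑ t ∈ Finset.range (k + 1), gget arr t j := by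
      rw [Rg k j, if_pos ⟨rfl, le_refl k⟩]
    refine ⟨dims_gmod Rd _ _ _, fun a b => ?_⟩
    rw [gget_gmod]
    by_cases hbb : b = j
    · subst hbb
      by_cases haa : a = k + 1
      · subst haa
        rw [if_pos ⟨rfl, rfl, by rw [Rd.1]; omega, by rw [Rd.2 (k + 1) (by omega)]; omega⟩]
        rw [hRkj, Rg (k + 1) b, if_neg (fun h => absurd h.2 (by omega)), if_pos ⟨rfl, by omega⟩,
          Finset.sum_range_succ (fun t => gget arr t b) (k + 1)]
        ring
      · rw [if_neg (fun h => haa h.1.symm), Rg a b]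
        by_cases hik : a ≤ k
        · rw [if_pos ⟨rfl, hik⟩, if_pos ⟨rfl, by omega⟩]
        · rw [if_neg (fun h => hik h.2), if_neg (fun h => absurd h.2 (by omega))]
    · rw [if_neg (fun h => hbb h.2.1.symm), Rg a b, if_neg (fun h => hbb h.1),
        if_neg (fun h => hbb h.1)]

lemma colOuter {m n : Nat} :
    ∀ (k : Nat), k ≤ n → ∀ (arr : List (List Int)), dims arr (m + 1) (n + 1) →
      dims ((List.range k).foldl (colPassCol m) arr) (m + 1) (n + 1) ∧
      ∀ i' j' : Nat, i' ≤ m →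
        gget ((List.range k).foldl (colPassCol m) arr) i' j' =
          if j' < k then ∑ t ∈ Finset.range (i' + 1), gget arr t j' else gget arr i' j' := by
  intro k
  induction k with
  | zero =>
    intro _ arr hd
    refine ⟨by simpa using hd, fun a b _ => ?_⟩
    simp only [List.range_zero, List.foldl_nil]
    rw [if_neg (Nat.not_lt_zero b)]
  | succ k ihk =>
    intro hk arr hd
    obtain ⟨Rd, Rg⟩ := ihk (by omega) arr hd
    rw [List.range_succ, List.foldl_append, List.foldl_cons, List.foldl_nil]
    set R := (List.range k).foldl (colPassCol m) arr with hR
    obtain ⟨Id, Ig⟩ := colInner (m := m) (n := n) k (by omega) m (le_refl m) R Rd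
    rw [show colPassCol m R k =
        (List.range m).foldl (fun a i => gmod a (i + 1) k (gget a i k)) R from rfl]
    refine ⟨Id, fun a b him => ?_⟩
    rw [Ig a b]
    by_cases hbb : b = k
    · subst hbb
      have harr : ∀ t, t ≤ m → gget R t b = gget arr t b := fun t ht => by
        rw [Rg t b ht, if_neg (by omega)]
      rw [if_pos ⟨rfl, him⟩, if_pos (by omega),
        Finset.sum_congr rfl (fun t ht => harr t (by
          have := Finset.mem_range.mp ht; omega))]
    · rw [if_neg (fun h => hbb h.1), Rg a b him]
      by_cases hjk : b < k
      · rw [if_pos hjk, if_pos (by omega)]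
      · rw [if_neg hjk, if_neg (by omega)]

lemma sum_map_range (k : Nat) (f : Nat → Int) :
    ((List.range k).map f).sum = ∑ t ∈ Finset.range k, f t := by
  induction k with
  | zero => simp
  | succ k ih => simp [List.range_succ, Finset.sum_range_succ, ih]

-- ---- A, stage 4: the double prefix sum of the corners telescopes to the rectangle delta ----

lemma corner_sum (v p q : Int) (hp : 0 ≤ p) (hq : 0 ≤ q) (i j : Nat) :
    (∑ a ∈ Finset.range (i + 1), ∑ b ∈ Finset.range (j + 1),
        (if (a : Int) = p ∧ (b : Int) = q then v else 0)) =
      if p ≤ (i : Int) ∧ q ≤ (j : Int) then v else 0 := by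
  have inner : ∀ a : Nat,
      (∑ b ∈ Finset.range (j + 1), (if (a : Int) = p ∧ (b : Int) = q then v else 0)) =
        if (a : Int) = p ∧ q ≤ (j : Int) then v else 0 := by
    intro a
    by_cases hap : (a : Int) = p
    · have step : ∀ b ∈ Finset.range (j + 1),
          (if (a : Int) = p ∧ (b : Int) = q then v else 0) = (if b = q.toNat then v else 0) := by
        intro b _
        exact if_congr (by omega) rfl rfl
      rw [Finset.sum_congr rfl step, Finset.sum_ite_eq' (Finset.range (j + 1)) q.toNat (fun _ => v)]
      exact if_congr (by rw [Finset.mem_range]; omega) rfl rfl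
    · simp [hap]
  rw [Finset.sum_congr rfl (fun a _ => inner a)]
  by_cases hqj : q ≤ (j : Int)
  · have step : ∀ a ∈ Finset.range (i + 1),
        (if (a : Int) = p ∧ q ≤ (j : Int) then v else 0) = (if a = p.toNat then v else 0) := by
      intro a _
      exact if_congr (by omega) rfl rfl
    rw [Finset.sum_congr rfl step, Finset.sum_ite_eq' (Finset.range (i + 1)) p.toNat (fun _ => v)]
    exact if_congr (by rw [Finset.mem_range]; omega) rfl rfl
  · simp [hqj]

lemma telescope {m n : Nat} {s : List Int} (hs : okSkill m n s) (i j : Nat) (hi : i < m) (hj : j < n) :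
    (∑ a ∈ Finset.range (i + 1), ∑ b ∈ Finset.range (j + 1), diffC s a b) = cover s i j := by
  obtain ⟨hlen, hr10, hr12, hr2m, hc10, hc12, hc2n⟩ := hs
  obtain ⟨t, r1, c1, r2, c2, d, rfl⟩ := six_shape hlen
  simp only [List.getD_cons_succ, List.getD_cons_zero] at hr10 hr12 hr2m hc10 hc12 hc2n
  simp only [diffC, cover, Finset.sum_add_distrib]
  rw [corner_sum (if t == 2 then d else -d) r1 c1 hr10 hc10 i j,
    corner_sum (if t == 2 then -d else d) r1 (c2 + 1) hr10 (by omega) i j,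
    corner_sum (if t == 2 then -d else d) (r2 + 1) c1 (by omega) hc10 i j,
    corner_sum (if t == 2 then d else -d) (r2 + 1) (c2 + 1) (by omega) (by omega) i j]
  split_ifs <;> first | ring1 | omega

lemma dsum_telescope {m n : Nat} (skill : List (List Int)) (hs : ∀ s ∈ skill, okSkill m n s)
    (i j : Nat) (hi : i < m) (hj : j < n) :
    (∑ a ∈ Finset.range (i + 1), ∑ b ∈ Finset.range (j + 1), dsum skill a b) = tot skill i j := by
  induction skill with
  | nil => simp [dsum, tot]
  | cons s rest ih =>
    have hds : ∀ a b : Nat, dsum (s :: rest) a b = diffC s a b + dsum rest a b := fun a b => by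
      simp [dsum]
    simp only [hds, Finset.sum_add_distrib]
    rw [telescope (hs s (by simp)) i j hi hj, ih (fun x hx => hs x (by simp [hx]))]
    simp [tot]

-- ---- A, stage 5: the final counting loop (mutating the board in place) ----

lemma countInner {m n : Nat} (G : List (List Int)) (i : Nat) (him : i < m) :
    ∀ (k : Nat), k ≤ n → ∀ (st : List (List Int) × Int), dimsGe st.1 m n →
      dimsGe ((List.range k).foldl (fun st j =>
          (gmod st.1 i j (gget G i j),
           st.2 + (if 0 < gget (gmod st.1 i j (gget G i j)) i j then (1 : Int) else 0))) st).1 m n ∧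
      (∀ a b : Nat, gget ((List.range k).foldl (fun st j =>
          (gmod st.1 i j (gget G i j),
           st.2 + (if 0 < gget (gmod st.1 i j (gget G i j)) i j then (1 : Int) else 0))) st).1 a b =
        if a = i ∧ b < k then gget st.1 a b + gget G i b else gget st.1 a b) ∧
      ((List.range k).foldl (fun st j =>
          (gmod st.1 i j (gget G i j),
           st.2 + (if 0 < gget (gmod st.1 i j (gget G i j)) i j then (1 : Int) else 0))) st).2 =
        st.2 + ∑ jj ∈ Finset.range k, (if 0 < gget st.1 i jj + gget G i jj then (1 : Int) else 0) := by
  intro k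
  induction k with
  | zero =>
    intro _ st hst
    refine ⟨by simpa using hst, fun a b => ?_, by simp⟩
    simp only [List.range_zero, List.foldl_nil]
    rw [if_neg (fun h => absurd h.2 (Nat.not_lt_zero b))]
  | succ k ihk =>
    intro hk st hst
    obtain ⟨Rd, Rg, Rz⟩ := ihk (by omega) st hst
    rw [List.range_succ, List.foldl_append, List.foldl_cons, List.foldl_nil]
    dsimp only
    have hcell : gget (gmod ((List.range k).foldl (fun st j =>
        (gmod st.1 i j (gget G i j),
         st.2 + (if 0 < gget (gmod st.1 i j (gget G i j)) i j then (1 : Int) else 0))) st).1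
          i k (gget G i k)) i k = gget st.1 i k + gget G i k := by
      rw [gget_gmod,
        if_pos ⟨rfl, rfl, by rw [Rd.1]; omega, by have := Rd.2 i (by omega); omega⟩,
        Rg i k, if_neg (fun h => absurd h.2 (by omega))]
    refine ⟨dimsGe_gmod Rd _ _ _, fun a b => ?_, ?_⟩
    · by_cases haa : a = i
      · subst haa
        by_cases hbb : b = k
        · subst hbb
          rw [hcell, if_pos ⟨rfl, by omega⟩]
        · rw [gget_gmod, if_neg (fun h => hbb h.2.1.symm), Rg a b]
          by_cases hbk : b < k
          · rw [if_pos ⟨rfl, hbk⟩, if_pos ⟨rfl, by omega⟩]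
          · rw [if_neg (fun h => hbk h.2), if_neg (fun h => absurd h.2 (by omega))]
      · rw [gget_gmod, if_neg (fun h => haa h.1.symm), Rg a b, if_neg (fun h => haa h.1),
          if_neg (fun h => haa h.1)]
    · rw [Rz, hcell, Finset.sum_range_succ]
      ring

lemma countOuter {m n : Nat} (G : List (List Int)) :
    ∀ (k : Nat), k ≤ m → ∀ (st : List (List Int) × Int), dimsGe st.1 m n →
      dimsGe ((List.range k).foldl (countRowA G n) st).1 m n ∧
      (∀ a b : Nat, gget ((List.range k).foldl (countRowA G n) st).1 a b =
        if a < k ∧ b < n then gget st.1 a b + gget G a b else gget st.1 a b) ∧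
      ((List.range k).foldl (countRowA G n) st).2 =
        st.2 + ∑ ii ∈ Finset.range k, ∑ jj ∈ Finset.range n,
          (if 0 < gget st.1 ii jj + gget G ii jj then (1 : Int) else 0) := by
  have hrow : ∀ (st : List (List Int) × Int) (i : Nat), countRowA G n st i =
      (List.range n).foldl (fun st j =>
        (gmod st.1 i j (gget G i j),
         st.2 + (if 0 < gget (gmod st.1 i j (gget G i j)) i j then (1 : Int) else 0))) st :=
    fun st i => rfl
  intro k
  induction k with
  | zero =>
    intro _ st hst
    refine ⟨by simpa using hst, fun a b => ?_, by simp⟩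
    simp only [List.range_zero, List.foldl_nil]
    rw [if_neg (fun h => absurd h.1 (Nat.not_lt_zero a))]
  | succ k ihk =>
    intro hk st hst
    obtain ⟨Rd, Rg, Rz⟩ := ihk (by omega) st hst
    rw [List.range_succ, List.foldl_append, List.foldl_cons, List.foldl_nil, hrow]
    obtain ⟨Id, Ig, Iz⟩ :=
      countInner (m := m) G k (by omega) n (le_refl n)
        ((List.range k).foldl (countRowA G n) st) Rd
    refine ⟨Id, fun a b => ?_, ?_⟩
    · rw [Ig a b]
      by_cases haa : a = k
      · have harr : ∀ t : Nat, gget ((List.range k).foldl (countRowA G n) st).1 a t =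
            gget st.1 a t := fun t => by
          rw [Rg a t, if_neg (fun h => absurd h.1 (by omega))]
        by_cases hbn : b < n
        · rw [if_pos ⟨haa, hbn⟩, if_pos ⟨by omega, hbn⟩, harr b, haa]
        · rw [if_neg (fun h => hbn h.2), if_neg (fun h => hbn h.2), harr b]
      · rw [if_neg (fun h => haa h.1), Rg a b]
        by_cases hak : a < k
        · by_cases hbn : b < n
          · rw [if_pos ⟨hak, hbn⟩, if_pos ⟨by omega, hbn⟩]
          · rw [if_neg (fun h => hbn h.2), if_neg (fun h => hbn h.2)]
        · rw [if_neg (fun h => hak h.1), if_neg (fun h => absurd h.1 (by omega))]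
    · rw [Iz, Rz, Finset.sum_range_succ, add_assoc]
      congr 2
      apply Finset.sum_congr rfl
      intro jj _
      rw [Rg k jj, if_neg (show ¬(k < k ∧ jj < n) from fun h => absurd h.1 (by omega))]

-- ---- B: the rectangle loops ----

lemma rectCols {m n : Nat} (ii δ : Int) (hii0 : 0 ≤ ii) (hiim : ii < (m : Int)) :
    ∀ (cnt : Nat) (a : Int), 0 ≤ a → a + cnt ≤ (n : Int) → ∀ (bd : List (List Int)), dimsGe bd m n →
      dimsGe ((PySem.List.pyRange a (a + cnt) 1).foldl (fun bd j => gmodI bd ii j δ) bd) m n ∧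
      ∀ i' j' : Nat,
        gget ((PySem.List.pyRange a (a + cnt) 1).foldl (fun bd j => gmodI bd ii j δ) bd) i' j' =
          if (i' : Int) = ii ∧ a ≤ (j' : Int) ∧ (j' : Int) < a + cnt
          then gget bd i' j' + δ else gget bd i' j' := by
  intro cnt
  induction cnt with
  | zero =>
    intro a ha0 han bd hbd
    have hempty : PySem.List.pyRange a (a + ((0 : Nat) : Int)) 1 = [] := by
      rw [PySem.List.pyRange_one]
      simp
    rw [hempty]
    refine ⟨hbd, fun i' j' => ?_⟩
    simp only [List.foldl_nil]
    rw [if_neg (fun h => by omega)]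
  | succ cnt ihc =>
    intro a ha0 han bd hbd
    rw [PySem.List.pyRange_one_cons (by omega), List.foldl_cons,
      gmodI_eq_gmod _ _ _ _ hii0 ha0]
    have hbd' := dimsGe_gmod hbd ii.toNat a.toNat δ
    rw [show a + ((cnt + 1 : Nat) : Int) = (a + 1) + ((cnt : Nat) : Int) by push_cast; ring]
    obtain ⟨Dd, Dg⟩ := ihc (a + 1) (by omega) (by omega) (gmod bd ii.toNat a.toNat δ) hbd'
    refine ⟨Dd, fun i' j' => ?_⟩
    rw [Dg i' j']
    have hcell : ∀ p q : Nat, gget (gmod bd ii.toNat a.toNat δ) p q =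
        if (p : Int) = ii ∧ (q : Int) = a then gget bd p q + δ else gget bd p q := by
      intro p q
      rw [gget_gmod]
      by_cases hc : (p : Int) = ii ∧ (q : Int) = a
      · rw [if_pos ⟨by omega, by omega, by rw [hbd.1]; omega,
          by have h2 := hbd.2 p (by omega); omega⟩, if_pos hc]
      · rw [if_neg (fun h => hc ⟨by omega, by omega⟩), if_neg hc]
    rw [hcell i' j']
    split_ifs <;> first | ring1 | omega

lemma rectRows {m n : Nat} (δ c1 c2 : Int) (hc0 : 0 ≤ c1) (hc : c1 ≤ c2) (hcn : c2 < (n : Int)) :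
    ∀ (cnt : Nat) (a : Int), 0 ≤ a → a + cnt ≤ (m : Int) → ∀ (bd : List (List Int)), dimsGe bd m n →
      dimsGe ((PySem.List.pyRange a (a + cnt) 1).foldl (fun bd i =>
          (PySem.List.pyRange c1 (c2 + 1) 1).foldl (fun bd j => gmodI bd i j δ) bd) bd) m n ∧
      ∀ i' j' : Nat,
        gget ((PySem.List.pyRange a (a + cnt) 1).foldl (fun bd i =>
          (PySem.List.pyRange c1 (c2 + 1) 1).foldl (fun bd j => gmodI bd i j δ) bd) bd) i' j' =
          if a ≤ (i' : Int) ∧ (i' : Int) < a + cnt ∧ c1 ≤ (j' : Int) ∧ (j' : Int) ≤ c2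
          then gget bd i' j' + δ else gget bd i' j' := by
  intro cnt
  induction cnt with
  | zero =>
    intro a ha0 ham bd hbd
    have hempty : PySem.List.pyRange a (a + ((0 : Nat) : Int)) 1 = [] := by
      rw [PySem.List.pyRange_one]
      simp
    rw [hempty]
    refine ⟨hbd, fun i' j' => ?_⟩
    simp only [List.foldl_nil]
    rw [if_neg (fun h => by omega)]
  | succ cnt ihr =>
    intro a ha0 ham bd hbd
    rw [PySem.List.pyRange_one_cons (a := a) (b := a + ((cnt + 1 : Nat) : Int)) (by omega),
      List.foldl_cons]
    have hcols := rectCols (m := m) (n := n) a δ ha0 (by omega)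
      (c2 + 1 - c1).toNat c1 hc0 (by omega)
    rw [show c1 + (((c2 + 1 - c1).toNat : Nat) : Int) = c2 + 1 by omega] at hcols
    obtain ⟨Cd, Cg⟩ := hcols bd hbd
    rw [show a + ((cnt + 1 : Nat) : Int) = (a + 1) + ((cnt : Nat) : Int) by push_cast; ring]
    obtain ⟨Dd, Dg⟩ := ihr (a + 1) (by omega) (by omega) _ Cd
    refine ⟨Dd, fun i' j' => ?_⟩
    rw [Dg i' j', Cg i' j']
    split_ifs <;> first | ring1 | omega

lemma stepB_char {m n : Nat} {s : List Int} (hs : okSkill m n s)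
    {bd : List (List Int)} (hd : dimsGe bd m n) :
    dimsGe (stepB bd s) m n ∧
    ∀ i' j' : Nat, gget (stepB bd s) i' j' = gget bd i' j' + cover s i' j' := by
  obtain ⟨hlen, hr10, hr12, hr2m, hc10, hc12, hc2n⟩ := hs
  obtain ⟨t, r1, c1, r2, c2, d, rfl⟩ := six_shape hlen
  simp only [List.getD_cons_succ, List.getD_cons_zero] at hr10 hr12 hr2m hc10 hc12 hc2n
  have hrows := rectRows (m := m) (n := n) (if t == 2 then d else -d) c1 c2 hc10 hc12 hc2n
    (r2 + 1 - r1).toNat r1 hr10 (by omega)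
  rw [show r1 + (((r2 + 1 - r1).toNat : Nat) : Int) = r2 + 1 by omega] at hrows
  obtain ⟨Dd, Dg⟩ := hrows bd hd
  constructor
  · simpa only [stepB, rectAdd] using Dd
  · intro i' j'
    simp only [stepB, rectAdd]
    rw [Dg i' j']
    simp only [cover]
    split_ifs <;> first | ring1 | omega

lemma foldB {m n : Nat} (skill : List (List Int)) (hs : ∀ s ∈ skill, okSkill m n s)
    (bd : List (List Int)) (hd : dimsGe bd m n) :
    dimsGe (skill.foldl stepB bd) m n ∧
    ∀ i' j' : Nat, gget (skill.foldl stepB bd) i' j' = gget bd i' j' + tot skill i' j' := by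
  induction skill generalizing bd with
  | nil => exact ⟨hd, fun i' j' => by simp [tot]⟩
  | cons s rest ih =>
    have hc := stepB_char (hs s (by simp)) hd
    obtain ⟨ihd, ihg⟩ := ih (fun x hx => hs x (by simp [hx])) (stepB bd s) hc.1
    refine ⟨ihd, fun i' j' => ?_⟩
    rw [List.foldl_cons, ihg i' j', hc.2 i' j']
    simp only [tot, List.map_cons, List.sum_cons]
    ring

lemma countB (m n : Nat) (g : Nat → Nat → Int) :
    ((List.range m).foldl (fun acc i =>
        (List.range n).foldl (fun acc j => acc + (if 0 < g i j then (1 : Int) else 0)) acc) 0) =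
      ∑ ii ∈ Finset.range m, ∑ jj ∈ Finset.range n, (if 0 < g ii jj then (1 : Int) else 0) := by
  have h1 : (fun (acc : Int) (i : Nat) =>
      (List.range n).foldl (fun acc j => acc + (if 0 < g i j then (1 : Int) else 0)) acc) =
      fun acc i => acc + ∑ jj ∈ Finset.range n, (if 0 < g i jj then (1 : Int) else 0) := by
    funext acc i
    rw [PySem.List.foldl_add, sum_map_range]
  rw [h1, PySem.List.foldl_add, sum_map_range, zero_add]

-- ===== VERDICT (by name: the statement is the Claim_ definition above) =====
theorem solution_spec : Claim_equal_solution := by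
  unfold Claim_equal_solution
  intro board skill _ hpre
  unfold Spec_solution
  obtain ⟨hne, hrows, hsk⟩ := hpre
  have hbd : dimsGe board board.length (board.headD []).length := by
    refine ⟨rfl, fun k hk => ?_⟩
    have hmem : board.getD k [] ∈ board := by
      rw [List.getD_eq_getElem?_getD, List.getElem?_eq_getElem hk]
      exact List.getElem_mem hk
    exact hrows _ hmem
  simp only [solution, solution_alt]
  set m := board.length with hm
  set n := (board.headD []).length with hn
  set A0 := List.replicate (m + 1) (List.replicate (n + 1) (0 : Int)) with hA0
  set A1 := skill.foldl stepA A0 with hA1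
  set A2 := (List.range m).foldl (rowPassRow n) A1 with hA2
  set A3 := (List.range n).foldl (colPassCol m) A2 with hA3
  set BB := skill.foldl stepB board with hBB
  obtain ⟨d1, g1⟩ := foldA1 (m := m) (n := n) skill hsk A0 (dims_replicate (m + 1) (n + 1))
  rw [← hA1] at d1 g1
  obtain ⟨d2, g2⟩ := rowOuter (m := m) (n := n) m (le_refl m) A1 d1
  rw [← hA2] at d2 g2
  obtain ⟨d3, g3⟩ := colOuter (m := m) (n := n) n (le_refl n) A2 d2
  rw [← hA3] at d3 g3
  have hTot : ∀ a b : Nat, a < m → b < n → gget A3 a b = tot skill a b := by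
    intro a b ha hb
    rw [g3 a b (by omega), if_pos hb]
    rw [Finset.sum_congr rfl (fun t ht => by
      rw [g2 t b, if_pos ⟨by have := Finset.mem_range.mp ht; omega, by omega⟩])]
    rw [Finset.sum_congr rfl (fun t ht => Finset.sum_congr rfl (fun u hu => by
      rw [g1 t u (by have := Finset.mem_range.mp ht; omega)
        (by have := Finset.mem_range.mp hu; omega), hA0, gget_replicate, zero_add]))]
    exact dsum_telescope skill hsk a b ha hb
  obtain ⟨cd, cg, cz⟩ := countOuter (m := m) (n := n) A3 m (le_refl m) (board, (0 : Int)) hbd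
  rw [cz]
  obtain ⟨dB, gB⟩ := foldB (m := m) (n := n) skill hsk board hbd
  rw [← hBB] at dB gB
  rw [countB m n (fun a b => gget BB a b)]
  have hz : ((board, (0 : Int))).2 = 0 := rfl
  rw [hz, zero_add]
  refine Finset.sum_congr rfl fun ii hii => Finset.sum_congr rfl fun jj hjj => ?_
  rw [hTot ii jj (Finset.mem_range.mp hii) (Finset.mem_range.mp hjj), gB ii jj]
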